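-- pv_equiv track=rewrite | github.com/7hacker/data-structures-algorithms-in-python | split53.py | _split53
-- ===== SOURCE A (Python) =====
-- def _split53(nums, group1, group2, index):
-- 	if index >= len(nums):
-- 		return group1 == group2
-- 	else:
-- 		case1 = False
-- 		case2 = False
-- 		case3 = False
--
-- 		if nums[index] % 5 == 0:
-- 			case1 = _split53(nums, group1 + nums[index], group2, index+1)
-- 		elif nums[index] % 3 == 0:
-- 			case2 = _split53(nums, group1, group2 + nums[index], index+1)
-- 		else:
-- 			case3 = _split53(nums, group1, group2, index+1)
-- 		return case1 or case2 or case3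
-- ===== SOURCE B (Python) =====
-- def _split53(nums, group1, group2, index):
--     t1, t2 = group1, group2
--     i = index
--     while i < len(nums):
--         x = nums[i]
--         if x % 5 == 0:
--             t1 += x
--         elif x % 3 == 0:
--             t2 += x
--         i += 1
--     return t1 == t2
-- ===== Notes on version B (the rewrite author's own statement) =====
-- stated objective: simpler
-- what changed: Replaces the branching recursion (which threads two accumulators through recursive calls and ors three case flags) with a single iterative while-loop that accumulates the two sums and compares them once at the end.
import Mathlib
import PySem

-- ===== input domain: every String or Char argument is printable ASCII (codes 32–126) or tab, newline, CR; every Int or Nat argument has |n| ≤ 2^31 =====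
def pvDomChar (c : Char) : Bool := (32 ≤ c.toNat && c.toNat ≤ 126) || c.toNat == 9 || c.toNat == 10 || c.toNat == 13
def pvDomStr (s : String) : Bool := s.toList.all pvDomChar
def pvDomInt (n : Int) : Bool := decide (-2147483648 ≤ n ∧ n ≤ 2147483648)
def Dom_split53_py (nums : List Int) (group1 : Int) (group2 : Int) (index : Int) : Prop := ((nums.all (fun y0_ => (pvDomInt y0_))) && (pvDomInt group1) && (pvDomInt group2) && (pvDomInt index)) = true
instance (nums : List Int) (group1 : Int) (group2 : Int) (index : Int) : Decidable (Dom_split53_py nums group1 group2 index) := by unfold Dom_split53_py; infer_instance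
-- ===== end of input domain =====

-- B replaces the branching recursion with one accumulating while-loop (simpler, constant space).

-- ===== PORT A =====
def split53_py (nums : List Int) (group1 : Int) (group2 : Int) (index : Int) : Bool :=
  if _h : (nums.length : Int) ≤ index then group1 == group2
  else
    match PySem.List.pyGet? nums index with
    | none => false  -- IndexError in Python; excluded by Pre_split53_py
    | some x =>
      if PySem.Int.mod x 5 == 0 then
        let case1 := split53_py nums (group1 + x) group2 (index + 1)
        case1 || false || false
      else if PySem.Int.mod x 3 == 0 then
        let case2 := split53_py nums group1 (group2 + x) (index + 1)
        false || case2 || false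
      else
        let case3 := split53_py nums group1 group2 (index + 1)
        false || false || case3
termination_by ((nums.length : Int) - index).toNat
decreasing_by all_goals omega

-- ===== PORT B =====
-- the while-loop of Source B: state (t1, t2, i), returns the final accumulators
def split53_loop (nums : List Int) (t1 : Int) (t2 : Int) (i : Int) : Int × Int :=
  if _h : i < (nums.length : Int) then
    match PySem.List.pyGet? nums i with
    | none => (t1, t2)  -- IndexError in Python; excluded by Pre_split53_py
    | some x =>
      if PySem.Int.mod x 5 == 0 then split53_loop nums (t1 + x) t2 (i + 1)
      else if PySem.Int.mod x 3 == 0 then split53_loop nums t1 (t2 + x) (i + 1)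
      else split53_loop nums t1 t2 (i + 1)
  else (t1, t2)
termination_by ((nums.length : Int) - i).toNat
decreasing_by all_goals omega

def split53_py_alt (nums : List Int) (group1 : Int) (group2 : Int) (index : Int) : Bool :=
  let r := split53_loop nums group1 group2 index
  r.1 == r.2

-- ===== PRECONDITION & SPEC =====
-- Pre_ excludes exactly the inputs on which Python A raises IndexError (nums[index] with
-- index below -len(nums)); B raises there too.
def Pre_split53_py (nums : List Int) (group1 : Int) (group2 : Int) (index : Int) : Prop :=
  -(nums.length : Int) ≤ index
instance (nums : List Int) (group1 : Int) (group2 : Int) (index : Int) : Decidable (Pre_split53_py nums group1 group2 index) := by unfold Pre_split53_py; infer_instance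
def pvWitness_split53_py : List Int × Int × Int × Int := ([5, 3, 1], 0, 0, 0)

def Spec_split53_py (nums : List Int) (group1 : Int) (group2 : Int) (index : Int) (out : Bool) : Prop := out = split53_py_alt nums group1 group2 index
instance (nums : List Int) (group1 : Int) (group2 : Int) (index : Int) (out : Bool) : Decidable (Spec_split53_py nums group1 group2 index out) := by unfold Spec_split53_py; infer_instance

-- ===== CLAIM (what is proved, stated in full; the proofs are below) =====
def Claim_equal_split53_py : Prop := ∀ (nums : List Int) (group1 : Int) (group2 : Int) (index : Int), Dom_split53_py nums group1 group2 index → Pre_split53_py nums group1 group2 index → Spec_split53_py nums group1 group2 index (split53_py nums group1 group2 index)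

-- ===== LEMMAS AND PROOFS =====
theorem split53_main (nums : List Int) : ∀ (n : Nat) (g1 g2 i : Int),
    ((nums.length : Int) - i).toNat = n → -(nums.length : Int) ≤ i →
    split53_py nums g1 g2 i =
      ((split53_loop nums g1 g2 i).1 == (split53_loop nums g1 g2 i).2) := by
  intro n
  induction n with
  | zero =>
    intro g1 g2 i hn _
    rw [split53_py, split53_loop]
    simp only [dif_pos (by omega : (nums.length : Int) ≤ i),
      dif_neg (by omega : ¬ i < (nums.length : Int))]
  | succ n ih =>
    intro g1 g2 i hn hge
    have hlt : i < (nums.length : Int) := by omega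
    obtain ⟨x, hx⟩ : ∃ x, PySem.List.pyGet? nums i = some x := by
      cases h : PySem.List.pyGet? nums i with
      | none =>
        rw [PySem.List.pyGet?_eq_none_iff] at h
        exact absurd ⟨hge, hlt⟩ h
      | some x => exact ⟨x, rfl⟩
    rw [split53_py, split53_loop]
    simp only [dif_neg (by omega : ¬ (nums.length : Int) ≤ i), dif_pos hlt, hx]
    by_cases h5 : PySem.Int.mod x 5 == 0
    · simp only [h5, Bool.or_false, Bool.false_or]
      exact ih (g1 + x) g2 (i + 1) (by omega) (by omega)
    · simp only [] at h5
      by_cases h3 : PySem.Int.mod x 3 == 0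
      · simp only [h5, h3, if_neg, if_pos, Bool.or_false, Bool.false_or,
          Bool.false_eq_true, not_false_eq_true]
        exact ih g1 (g2 + x) (i + 1) (by omega) (by omega)
      · simp only [h5, h3, Bool.false_eq_true, not_false_eq_true, if_neg,
          Bool.or_false, Bool.false_or]
        exact ih g1 g2 (i + 1) (by omega) (by omega)

-- ===== VERDICT (by name: the statement is the Claim_ definition above) =====
theorem split53_py_spec : Claim_equal_split53_py := by
  intro nums g1 g2 i _ hpre
  unfold Spec_split53_py split53_py_alt
  exact split53_main nums _ g1 g2 i rfl hpre
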